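-- pv_equiv track=rewrite | github.com/supasuge/My-CTF-Challenges | PwnSecCTF-2025/Orbital-Permutations/challenge/cipher.py | ring_positions_on_face
-- ===== SOURCE A (Python) =====
-- from typing import Dict, List, Tuple, Sequence, Optional
--
-- def ring_positions_on_face(face_size: int, ring: int) -> List[Tuple[int,int]]:
--     """
--     Return (r,c) perimeter coordinates for a given ring:
--       ring=0 -> outer perimeter of the 5x5 (length 24)
--       ring=1 -> perimeter of the inner 3x3 (length 8)
--     """
--     if ring not in (0,1):
--         raise ValueError("ring must be 0 (outer) or 1 (inner)")
--     n = face_size - 2*ring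
--     offset = ring
--     if n <= 1:
--         return []
--     coords = []
--     # top row
--     for c in range(offset, offset+n):
--         coords.append((offset, c))
--     # right col (skip top)
--     for r in range(offset+1, offset+n-1):
--         coords.append((r, offset+n-1))
--     # bottom row (reverse)
--     if n > 1:
--         for c in range(offset+n-1, offset-1, -1):
--             coords.append((offset+n-1, c))
--     # left col (skip top/bottom)
--     for r in range(offset+n-2, offset, -1):
--         coords.append((r, offset))
--     # remove duplicates for 2× n perimeter logic
--     # ensure unique cycle ordering (outer: 24, inner: 8)
--     uniq = []
--     seen = set()
--     for rc in coords:
--         if rc not in seen: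
--             seen.add(rc)
--             uniq.append(rc)
--     return uniq
-- ===== SOURCE B (Python) =====
-- def ring_positions_on_face(face_size, ring):
--     """
--     Border cells of the ring's square, generated once in row-major order,
--     then sorted by a closed-form clockwise perimeter index (top row, right
--     column, bottom row reversed, left column upward) -- no traversal, no dedup.
--     """
--     if ring not in (0, 1):
--         raise ValueError("ring must be 0 (outer) or 1 (inner)")
--     n = face_size - 2 * ring
--     o = ring
--     if n <= 1:
--         return []
--     last = o + n - 1
--     cells = []
--     for r in range(o, last + 1):
--         if r == o or r == last:
--             for c in range(o, last + 1):
--                 cells.append((r, c))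
--         else:
--             cells.append((r, o))
--             cells.append((r, last))
--
--     def key(rc):
--         r, c = rc
--         if r == o:
--             return c - o
--         if c == last:
--             return (n - 1) + (r - o)
--         if r == last:
--             return 2 * (n - 1) + (last - c)
--         return 3 * (n - 1) + (last - r)
--
--     return sorted(cells, key=key)
-- ===== Notes on version B (the rewrite author's own statement) =====
-- stated objective: alternative
-- what changed: A traces the perimeter with four separate directional edge loops and then removes duplicates with a seen-set pass; B instead generates the border cells once in row-major order and sorts them by a closed-form clockwise perimeter index, needing no dedup; Pre_ excludes rings other than 0 and 1, where A raises ValueError.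
import Mathlib
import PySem

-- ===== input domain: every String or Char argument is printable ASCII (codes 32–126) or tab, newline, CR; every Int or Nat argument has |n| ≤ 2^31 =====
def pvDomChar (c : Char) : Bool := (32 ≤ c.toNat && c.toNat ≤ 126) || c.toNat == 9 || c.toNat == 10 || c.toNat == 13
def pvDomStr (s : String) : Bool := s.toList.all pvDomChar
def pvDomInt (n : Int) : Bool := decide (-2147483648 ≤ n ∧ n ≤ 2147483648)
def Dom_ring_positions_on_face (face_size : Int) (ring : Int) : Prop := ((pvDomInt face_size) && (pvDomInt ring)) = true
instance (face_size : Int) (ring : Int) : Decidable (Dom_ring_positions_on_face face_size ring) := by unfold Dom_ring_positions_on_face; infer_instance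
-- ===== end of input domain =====

-- B replaces A's four directional perimeter loops + seen-set dedup by generating the border
-- cells once in row-major order and sorting them by a closed-form clockwise perimeter index:
-- a different algorithm (generate-and-sort vs traversal), similar cost.


-- ===== PORT A =====
-- A's keep-first dedup pass over coords, with its seen set
def pvDedupStep (st : List (Int × Int) × PySem.Set (Int × Int)) (rc : Int × Int) :
    List (Int × Int) × PySem.Set (Int × Int) :=
  if PySem.Set.contains st.2 rc then st else (st.1 ++ [rc], PySem.Set.add st.2 rc)

def pvDedup (coords : List (Int × Int)) : List (Int × Int) :=
  (coords.foldl pvDedupStep ([], PySem.Set.empty)).1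

-- Pre_ excludes ring ∉ {0,1}: A raises ValueError there.
def ring_positions_on_face (face_size : Int) (ring : Int) : List (Int × Int) :=
  let n := face_size - 2 * ring
  let offset := ring
  if n ≤ 1 then []
  else
    let coords : List (Int × Int) := []
    -- top row
    let coords := (PySem.List.pyRange offset (offset + n) 1).foldl
      (fun acc c => acc ++ [(offset, c)]) coords
    -- right col (skip top)
    let coords := (PySem.List.pyRange (offset + 1) (offset + n - 1) 1).foldl
      (fun acc r => acc ++ [(r, offset + n - 1)]) coords
    -- bottom row (reverse)
    let coords := if n > 1 then
        (PySem.List.pyRange (offset + n - 1) (offset - 1) (-1)).foldl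
          (fun acc c => acc ++ [(offset + n - 1, c)]) coords
      else coords
    -- left col (skip top/bottom)
    let coords := (PySem.List.pyRange (offset + n - 2) offset (-1)).foldl
      (fun acc r => acc ++ [(r, offset)]) coords
    pvDedup coords

-- ===== PORT B =====
-- B's closed-form clockwise perimeter index of a border cell
def pvKey (o last n : Int) (rc : Int × Int) : Int :=
  if rc.1 = o then rc.2 - o
  else if rc.2 = last then (n - 1) + (rc.1 - o)
  else if rc.1 = last then 2 * (n - 1) + (last - rc.2)
  else 3 * (n - 1) + (last - rc.1)

def ring_positions_on_face_alt (face_size : Int) (ring : Int) : List (Int × Int) :=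
  let n := face_size - 2 * ring
  let o := ring
  if n ≤ 1 then []
  else
    let last := o + n - 1
    -- row-major generation of the border cells
    let cells := (PySem.List.pyRange o (last + 1) 1).foldl
      (fun acc r =>
        if r = o ∨ r = last then
          (PySem.List.pyRange o (last + 1) 1).foldl (fun acc2 c => acc2 ++ [(r, c)]) acc
        else
          acc ++ [(r, o)] ++ [(r, last)])
      []
    PySem.List.sorted cells (pvKey o last n) false

-- ===== PRECONDITION & SPEC =====
-- Pre_ admits exactly the rings A accepts; for any other ring A raises ValueError.
def Pre_ring_positions_on_face (face_size : Int) (ring : Int) : Prop := ring = 0 ∨ ring = 1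
instance (face_size : Int) (ring : Int) : Decidable (Pre_ring_positions_on_face face_size ring) := by
  unfold Pre_ring_positions_on_face; infer_instance
def pvWitness_ring_positions_on_face : Int × Int := (5, 1)

def Spec_ring_positions_on_face (face_size : Int) (ring : Int) (out : List (Int × Int)) : Prop := out = ring_positions_on_face_alt face_size ring
instance (face_size : Int) (ring : Int) (out : List (Int × Int)) : Decidable (Spec_ring_positions_on_face face_size ring out) := by unfold Spec_ring_positions_on_face; infer_instance

-- ===== CLAIM (what is proved, stated in full; the proofs are below) =====
def Claim_equal_ring_positions_on_face : Prop := ∀ (face_size : Int) (ring : Int), Dom_ring_positions_on_face face_size ring → Pre_ring_positions_on_face face_size ring → Spec_ring_positions_on_face face_size ring (ring_positions_on_face face_size ring)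

-- ===== LEMMAS AND PROOFS =====

-- the clockwise perimeter cycle, as four segments (proof-only normal form)
def pvSeg (o : Int) (m : Nat) : List (Int × Int) :=
  (List.range (m+2)).map (fun k : Nat => ((o : Int), o + (k : Int)))
  ++ ((List.range m).map (fun k : Nat => (o + 1 + (k : Int), o + (m : Int) + 1))
  ++ ((List.range (m+2)).map (fun k : Nat => (o + (m : Int) + 1, o + (m : Int) + 1 - (k : Int)))
  ++ (List.range m).map (fun k : Nat => (o + (m : Int) - (k : Int), (o : Int)))))

-- folding "append one pair" equals init ++ map
theorem pv_foldl_push {α : Type} (f : α → Int × Int) :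
    ∀ (l : List α) (init : List (Int × Int)),
      l.foldl (fun acc x => acc ++ [f x]) init = init ++ l.map f := by
  intro l
  induction l with
  | nil => simp
  | cons a t ih => intro init; simp [List.foldl_cons, ih]

-- folding "append a block per element" equals init ++ flatMap
theorem pv_foldl_flat {α : Type} (row : α → List (Int × Int)) :
    ∀ (l : List α) (init : List (Int × Int)),
      l.foldl (fun acc x => acc ++ row x) init = init ++ l.flatMap row := by
  intro l
  induction l with
  | nil => simp
  | cons a t ih => intro init; simp [List.foldl_cons, ih]

-- a strictly key-increasing map over range is Pairwise (key <)
theorem pv_pw_map (f : Nat → Int × Int) (key : Int × Int → Int) (len : Nat)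
    (h : ∀ i j : Nat, i < j → j < len → key (f i) < key (f j)) :
    ((List.range len).map f).Pairwise (fun a b => key a < key b) := by
  rw [List.pairwise_map]
  exact List.pairwise_lt_range.imp_of_mem
    (fun ha hb hij => h _ _ hij (List.mem_range.mp hb))

-- the perimeter index is strictly increasing along pvSeg
theorem pvSeg_pairwise (o : Int) (m : Nat) :
    (pvSeg o m).Pairwise
      (fun a b => pvKey o (o + (m : Int) + 1) ((m : Int) + 2) a
                < pvKey o (o + (m : Int) + 1) ((m : Int) + 2) b) := by
  have key1 : ∀ k : Nat, pvKey o (o + (m:Int) + 1) ((m:Int) + 2) ((o : Int), o + (k:Int)) = (k:Int) := by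
    intro k; simp only [pvKey]; split_ifs <;> omega
  have key2 : ∀ k : Nat, k < m →
      pvKey o (o + (m:Int) + 1) ((m:Int) + 2) (o + 1 + (k:Int), o + (m:Int) + 1) = (m:Int) + 2 + (k:Int) := by
    intro k hk; simp only [pvKey]; split_ifs <;> omega
  have key3 : ∀ k : Nat, k < m + 2 →
      pvKey o (o + (m:Int) + 1) ((m:Int) + 2) (o + (m:Int) + 1, o + (m:Int) + 1 - (k:Int)) = 2*(m:Int) + 2 + (k:Int) := by
    intro k hk; simp only [pvKey]; split_ifs <;> omega
  have key4 : ∀ k : Nat, k < m →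
      pvKey o (o + (m:Int) + 1) ((m:Int) + 2) (o + (m:Int) - (k:Int), (o : Int)) = 3*(m:Int) + 4 + (k:Int) := by
    intro k hk; simp only [pvKey]; split_ifs <;> omega
  unfold pvSeg
  simp only [List.pairwise_append, List.mem_append, List.mem_map, List.mem_range]
  refine ⟨?_, ⟨?_, ⟨?_, ?_, ?_⟩, ?_⟩, ?_⟩
  · exact pv_pw_map _ _ _ (fun i j hij hj => by rw [key1, key1]; omega)
  · exact pv_pw_map _ _ _ (fun i j hij hj => by rw [key2 i (by omega), key2 j hj]; omega)
  · exact pv_pw_map _ _ _ (fun i j hij hj => by rw [key3 i (by omega), key3 j hj]; omega)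
  · exact pv_pw_map _ _ _ (fun i j hij hj => by rw [key4 i (by omega), key4 j hj]; omega)
  · rintro a ⟨i, hi, rfl⟩ b ⟨j, hj, rfl⟩
    rw [key3 i hi, key4 j hj]; omega
  · rintro a ⟨i, hi, rfl⟩ b (⟨j, hj, rfl⟩ | ⟨j, hj, rfl⟩)
    · rw [key2 i hi, key3 j hj]; omega
    · rw [key2 i hi, key4 j hj]; omega
  · rintro a ⟨i, hi, rfl⟩ b (⟨j, hj, rfl⟩ | ⟨j, hj, rfl⟩ | ⟨j, hj, rfl⟩)
    · rw [key1, key2 j hj]; omega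
    · rw [key1, key3 j hj]; omega
    · rw [key1, key4 j hj]; omega

-- the keep-first dedup pass is the identity on a duplicate-free list
theorem pv_dedup_go :
    ∀ (l : List (Int × Int)) (st : List (Int × Int) × PySem.Set (Int × Int)),
      (∀ x, x ∈ st.2 ↔ x ∈ st.1) → (∀ x ∈ l, x ∉ st.1) → l.Nodup →
      (l.foldl pvDedupStep st).1 = st.1 ++ l := by
  intro l
  induction l with
  | nil => intro st _ _ _; simp
  | cons a t ih =>
    intro st hinv hdisj hnd
    simp only [List.foldl_cons]
    have hca : ¬ (PySem.Set.contains st.2 a = true) := by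
      intro hc
      exact hdisj a (List.mem_cons_self) ((hinv a).mp ((PySem.Set.contains_iff _ _).mp hc))
    rw [show pvDedupStep st a = (st.1 ++ [a], PySem.Set.add st.2 a) by
      unfold pvDedupStep; rw [if_neg hca]]
    rw [ih (st.1 ++ [a], PySem.Set.add st.2 a)
      (by intro x
          simp only [PySem.Set.mem_add, List.mem_append, List.mem_singleton]
          exact or_congr (hinv x) Iff.rfl)
      (by intro x hx
          simp only [List.mem_append, List.mem_singleton]
          rintro (h | rfl)
          · exact hdisj x (List.mem_cons_of_mem _ hx) h
          · exact (List.nodup_cons.mp hnd).1 hx)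
      (List.nodup_cons.mp hnd).2]
    simp

theorem pv_dedup_nodup (l : List (Int × Int)) (h : l.Nodup) : pvDedup l = l := by
  unfold pvDedup
  rw [pv_dedup_go l ([], PySem.Set.empty) (by intro x; simp [PySem.Set.empty]) (by simp) h]
  simp

-- interleaved pairs are a permutation of the two columns
theorem pv_pair_perm {α : Type} (f g : α → Int × Int) :
    ∀ l : List α, (l.flatMap (fun x => [f x, g x])).Perm (l.map f ++ l.map g) := by
  intro l
  induction l with
  | nil => simp
  | cons a t ih =>
    simp only [List.flatMap_cons, List.map_cons, List.cons_append]
    exact ((ih.cons (g a)).trans List.perm_middle.symm).cons (f a)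

-- a map over range that runs backwards is the reverse of the forward map
theorem pv_map_range_reverse (f g : Nat → Int × Int) (len : Nat)
    (h : ∀ k, k < len → g k = f (len - 1 - k)) :
    (List.range len).map g = ((List.range len).map f).reverse := by
  apply List.ext_getElem
  · simp
  intro i h1 h2
  have hi : i < len := by simpa using h1
  simp only [List.getElem_reverse, List.length_map, List.length_range,
    List.getElem_map, List.getElem_range]
  rw [h i hi]

-- splitting a flatMap over range (m+2) into first, middle, last rows
theorem pv_flatMap_rows (f : Nat → List (Int × Int)) (m : Nat) :
    (List.range (m+2)).flatMap f
      = f 0 ++ ((List.range m).flatMap (fun k => f (k+1)) ++ f (m+1)) := by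
  rw [show m+2 = (m+1)+1 from rfl, List.range_succ_eq_map, List.range_succ]
  simp [List.flatMap_cons, List.flatMap_append, List.flatMap_map, Nat.succ_eq_add_one]

-- ===== VERDICT (by name: the statement is the Claim_ definition above) =====
theorem ring_positions_on_face_spec : Claim_equal_ring_positions_on_face := by
  intro face_size ring _ _
  unfold Spec_ring_positions_on_face ring_positions_on_face ring_positions_on_face_alt
  by_cases hn : face_size - 2 * ring ≤ 1
  · simp [hn]
  · simp only [if_neg hn]
    set o := ring with ho
    set n := face_size - 2 * ring with hdefn
    obtain ⟨m, hm⟩ : ∃ m : Nat, n = (m : Int) + 2 := ⟨(n - 2).toNat, by omega⟩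
    -- ---- A's side: the four edge loops produce exactly pvSeg, and dedup is the identity on it
    have hA : (PySem.List.pyRange (o + n - 2) o (-1)).foldl (fun acc r => acc ++ [(r, o)])
        ((if n > 1 then
            (PySem.List.pyRange (o + n - 1) (o - 1) (-1)).foldl (fun acc c => acc ++ [(o + n - 1, c)])
              ((PySem.List.pyRange (o + 1) (o + n - 1) 1).foldl (fun acc r => acc ++ [(r, o + n - 1)])
                ((PySem.List.pyRange o (o + n) 1).foldl (fun acc c => acc ++ [(o, c)]) []))
          else
            (PySem.List.pyRange (o + 1) (o + n - 1) 1).foldl (fun acc r => acc ++ [(r, o + n - 1)])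
              ((PySem.List.pyRange o (o + n) 1).foldl (fun acc c => acc ++ [(o, c)]) [])))
        = pvSeg o m := by
      rw [if_pos (by omega : n > 1)]
      rw [pv_foldl_push (fun c => ((o : Int), c)),
          pv_foldl_push (fun r => (r, o + n - 1)),
          pv_foldl_push (fun c => (o + n - 1, c)),
          pv_foldl_push (fun r => (r, o))]
      simp only [PySem.List.pyRange_one, PySem.List.pyRange_neg_one, List.map_map,
        List.nil_append, List.append_assoc]
      have ht : (o + n - o).toNat = m + 2 := by omega
      have hr : (o + n - 1 - (o + 1)).toNat = m := by omega
      have hb : (o + n - 1 - (o - 1)).toNat = m + 2 := by omega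
      have hl : (o + n - 2 - o).toNat = m := by omega
      rw [ht, hr, hb, hl]
      unfold pvSeg
      have c1 : List.map ((fun c => ((o : Int), c)) ∘ fun k : Nat => o + (k : Int)) (List.range (m+2))
          = (List.range (m+2)).map (fun k : Nat => ((o : Int), o + (k : Int))) :=
        List.map_congr_left (fun k _ => rfl)
      have c2 : List.map ((fun r => (r, o + n - 1)) ∘ fun k : Nat => o + 1 + (k : Int)) (List.range m)
          = (List.range m).map (fun k : Nat => (o + 1 + (k : Int), o + (m : Int) + 1)) :=
        List.map_congr_left (fun k _ => by
          simp only [Function.comp_apply, Prod.mk.injEq, true_and, and_true]; omega)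
      have c3 : List.map ((fun c => (o + n - 1, c)) ∘ fun k : Nat => o + n - 1 - (k : Int)) (List.range (m+2))
          = (List.range (m+2)).map (fun k : Nat => (o + (m : Int) + 1, o + (m : Int) + 1 - (k : Int))) :=
        List.map_congr_left (fun k _ => by
          simp only [Function.comp_apply, Prod.mk.injEq, true_and, and_true]; omega)
      have c4 : List.map ((fun r => (r, o)) ∘ fun k : Nat => o + n - 2 - (k : Int)) (List.range m)
          = (List.range m).map (fun k : Nat => (o + (m : Int) - (k : Int), (o : Int))) :=
        List.map_congr_left (fun k _ => by
          simp only [Function.comp_apply, Prod.mk.injEq, true_and, and_true]; omega)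
      rw [c1, c2, c3, c4]
    rw [hA]
    have hpw := pvSeg_pairwise o m
    have hkeyeq : pvKey o (o + n - 1) n = pvKey o (o + (m:Int) + 1) ((m:Int) + 2) := by
      rw [show o + n - 1 = o + (m:Int) + 1 by omega, show n = (m:Int) + 2 from hm]
    rw [pv_dedup_nodup _ (hpw.imp (fun h he => absurd (he ▸ h) (lt_irrefl _)))]
    -- ---- B's side: row-major cells sort to pvSeg
    -- normalise B's fold into a flatMap of per-row blocks
    have hrowfun : (fun (acc : List (Int × Int)) (r : Int) =>
        if r = o ∨ r = o + n - 1 then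
          (PySem.List.pyRange o (o + n - 1 + 1) 1).foldl (fun acc2 c => acc2 ++ [(r, c)]) acc
        else acc ++ [(r, o)] ++ [(r, o + n - 1)])
        = (fun acc r => acc ++
            (if r = o ∨ r = o + n - 1 then
              (PySem.List.pyRange o (o + n - 1 + 1) 1).map (fun c => (r, c))
            else [(r, o), (r, o + n - 1)])) := by
      funext acc r
      split_ifs with h
      · exact pv_foldl_push (fun c => (r, c)) _ acc
      · simp
    rw [hrowfun, pv_foldl_flat, List.nil_append]
    have hcols : PySem.List.pyRange o (o + n - 1 + 1) 1
        = (List.range (m + 2)).map (fun k : Nat => o + (k : Int)) := by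
      rw [PySem.List.pyRange_one, show (o + n - 1 + 1 - o).toNat = m + 2 by omega]
    rw [hcols, List.flatMap_map, pv_flatMap_rows]
    -- evaluate the three kinds of rows
    rw [if_pos (Or.inl (by simp : o + ((0:Nat) : Int) = o))]
    rw [if_pos (Or.inr (by push_cast; omega : o + (((m+1) : Nat) : Int) = o + n - 1))]
    rw [List.flatMap_congr (g := fun k : Nat =>
        [(o + (((k+1) : Nat) : Int), o), (o + (((k+1) : Nat) : Int), o + n - 1)])
      (by intro k hk
          have hkm : k < m := List.mem_range.mp hk
          rw [if_neg]
          push_cast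
          omega)]
    -- name the four row-major blocks
    refine Eq.symm (PySem.List.sorted_eq_of_perm_of_pairwise_lt _ _ _ ?_ ?_)
    · -- permutation: compare as multisets
      rw [← Multiset.coe_eq_coe]
      have hmid := Multiset.coe_eq_coe.mpr
        (pv_pair_perm (fun k : Nat => (o + (((k+1) : Nat) : Int), o))
          (fun k : Nat => (o + (((k+1) : Nat) : Int), o + n - 1)) (List.range m))
      unfold pvSeg
      simp only [← Multiset.coe_add, List.append_assoc] at *
      rw [show (List.flatMap (fun k : Nat =>
            [(o + (((k+1) : Nat) : Int), o), (o + (((k+1) : Nat) : Int), o + n - 1)])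
            (List.range m) : Multiset (Int × Int))
          = ↑((List.range m).map (fun k : Nat => (o + (((k+1) : Nat) : Int), o)))
            + ↑((List.range m).map (fun k : Nat => (o + (((k+1) : Nat) : Int), o + n - 1))) from hmid]
      -- identify each block with a pvSeg segment (up to reversal)
      have e1 : ((List.range (m+2)).map (fun k : Nat => o + (k : Int))).map (fun c => (o + ((0:Nat) : Int), c))
          = (List.range (m+2)).map (fun k : Nat => ((o : Int), o + (k : Int))) := by
        rw [List.map_map]
        exact List.map_congr_left (fun k _ => by simp)
      have e2 : (List.range m).map (fun k : Nat => (o + (((k+1) : Nat) : Int), o + n - 1))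
          = (List.range m).map (fun k : Nat => (o + 1 + (k : Int), o + (m : Int) + 1)) := by
        exact List.map_congr_left (fun k _ => by
          simp only [Prod.mk.injEq, true_and, and_true]; push_cast; omega)
      have e3 : (List.range (m+2)).map (fun k : Nat => (o + (m : Int) + 1, o + (m : Int) + 1 - (k : Int)))
          = (((List.range (m+2)).map (fun k : Nat => o + (k : Int))).map (fun c => (o + (((m+1) : Nat) : Int), c))).reverse := by
        rw [List.map_map]
        apply pv_map_range_reverse
        intro k hk
        simp only [Function.comp_apply, Prod.mk.injEq, true_and, and_true]
        push_cast
        omega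
      have e4 : (List.range m).map (fun k : Nat => (o + (m : Int) - (k : Int), (o : Int)))
          = ((List.range m).map (fun k : Nat => (o + (((k+1) : Nat) : Int), o))).reverse := by
        apply pv_map_range_reverse
        intro k hk
        simp only [Prod.mk.injEq, true_and, and_true]
        push_cast
        omega
      rw [e1, e2, e3, e4]
      simp only [Multiset.coe_reverse]
      abel
    · -- strict key order along pvSeg
      rw [hkeyeq]
      exact hpw
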